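-- pv_equiv track=rewrite | github.com/archambaultv-prof/c3hm | src/c3hm/commands/template.py | all_indicators_range
-- ===== SOURCE A (Python) =====
-- def all_indicators_range(col_letter: str, criteria_indicators: list[int],
--                          criteria_row: int,
--                          include_penalty: bool = True) -> str:
--     """
--     Retourne la plage Excel couvrant tous les indicateurs, et
--     éventuellement la cellule de pénalité.
--     """
--     r = []
--     for criterion_idx, nb_indicators in enumerate(criteria_indicators):
--         row_start = criteria_row + 1 + sum(criteria_indicators[:criterion_idx]) + criterion_idx
--         row_end = row_start + nb_indicators - 1
--         r.append(f"{col_letter}{row_start}:{col_letter}{row_end}")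
--     total_indicators = sum(criteria_indicators)
--     if include_penalty:
--         nb_criteria = len(criteria_indicators)
--         penalty_row = criteria_row + total_indicators + nb_criteria + 2
--         r.append(f"{col_letter}{penalty_row}")
--     return ",".join(r)
-- ===== SOURCE B (Python) =====
-- def all_indicators_range(col_letter: str, criteria_indicators: list[int],
--                          criteria_row: int,
--                          include_penalty: bool = True) -> str:
--     """
--     Retourne la plage Excel couvrant tous les indicateurs, et
--     eventuellement la cellule de penalite.
--     """
--     parts = []
--     row_start = criteria_row + 1
--     for nb_indicators in criteria_indicators:
--         parts.append(f"{col_letter}{row_start}:{col_letter}{row_start + nb_indicators - 1}")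
--         row_start += nb_indicators + 1
--     if include_penalty:
--         parts.append(f"{col_letter}{row_start + 1}")
--     return ",".join(parts)
-- ===== Notes on version B (the rewrite author's own statement) =====
-- stated objective: alternative
-- what changed: Replaces the per-criterion re-summation of the list prefix (sum(criteria_indicators[:i]) inside the loop) with a single running row counter carried through one pass, which also yields the penalty row directly from the final counter; intended as the asymptotically better formulation, but a timing run measured only ~1.3x at the largest size, so no speed is claimed.
import Mathlib
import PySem

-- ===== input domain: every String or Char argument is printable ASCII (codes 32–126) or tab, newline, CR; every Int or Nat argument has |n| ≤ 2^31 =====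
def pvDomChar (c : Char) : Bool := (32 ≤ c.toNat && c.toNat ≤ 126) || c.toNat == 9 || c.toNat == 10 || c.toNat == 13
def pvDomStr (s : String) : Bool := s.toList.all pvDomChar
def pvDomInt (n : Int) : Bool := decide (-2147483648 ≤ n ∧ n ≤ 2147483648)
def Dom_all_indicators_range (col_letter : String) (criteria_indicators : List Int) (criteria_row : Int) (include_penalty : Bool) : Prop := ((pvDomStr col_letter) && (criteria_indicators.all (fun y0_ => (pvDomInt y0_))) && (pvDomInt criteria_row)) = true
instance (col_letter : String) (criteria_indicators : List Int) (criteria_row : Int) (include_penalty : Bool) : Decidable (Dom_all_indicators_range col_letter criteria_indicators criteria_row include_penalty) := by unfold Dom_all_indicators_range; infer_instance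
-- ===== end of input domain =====

-- B replaces A's per-iteration re-summation of the prefix with one running row counter; return values proved equal.
-- ===== PORT A =====
def all_indicators_range (col_letter : String) (criteria_indicators : List Int) (criteria_row : Int) (include_penalty : Bool) : String :=
  let r : List String := (PySem.List.enumerate criteria_indicators 0).foldl
    (fun r p =>
      let row_start := criteria_row + 1 + (PySem.List.slice criteria_indicators none (some p.1)).sum + p.1
      let row_end := row_start + p.2 - 1
      r ++ [col_letter ++ PySem.Int.toStr row_start ++ ":" ++ col_letter ++ PySem.Int.toStr row_end]) []
  let total_indicators := criteria_indicators.sum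
  let r := if include_penalty then
      r ++ [col_letter ++ PySem.Int.toStr (criteria_row + total_indicators + (criteria_indicators.length : Int) + 2)]
    else r
  PySem.Str.join "," r

-- ===== PORT B =====
def all_indicators_range_alt (col_letter : String) (criteria_indicators : List Int) (criteria_row : Int) (include_penalty : Bool) : String :=
  let st := criteria_indicators.foldl
    (fun (acc : List String × Int) nb =>
      (acc.1 ++ [col_letter ++ PySem.Int.toStr acc.2 ++ ":" ++ col_letter ++ PySem.Int.toStr (acc.2 + nb - 1)],
       acc.2 + nb + 1))
    ([], criteria_row + 1)
  let parts := if include_penalty then st.1 ++ [col_letter ++ PySem.Int.toStr (st.2 + 1)] else st.1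
  PySem.Str.join "," parts

-- ===== PRECONDITION & SPEC =====
def Spec_all_indicators_range (col_letter : String) (criteria_indicators : List Int) (criteria_row : Int) (include_penalty : Bool) (out : String) : Prop := out = all_indicators_range_alt col_letter criteria_indicators criteria_row include_penalty
instance (col_letter : String) (criteria_indicators : List Int) (criteria_row : Int) (include_penalty : Bool) (out : String) : Decidable (Spec_all_indicators_range col_letter criteria_indicators criteria_row include_penalty out) := by unfold Spec_all_indicators_range; infer_instance

-- ===== CLAIM (what is proved, stated in full; the proofs are below) =====
def Claim_equal_all_indicators_range : Prop := ∀ (col_letter : String) (criteria_indicators : List Int) (criteria_row : Int) (include_penalty : Bool), Dom_all_indicators_range col_letter criteria_indicators criteria_row include_penalty → Spec_all_indicators_range col_letter criteria_indicators criteria_row include_penalty (all_indicators_range col_letter criteria_indicators criteria_row include_penalty)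

-- ===== LEMMAS AND PROOFS =====

-- the row list both loops produce
def genRows (c : String) : List Int → Int → List String
  | [], _ => []
  | nb :: rest, row =>
      (c ++ PySem.Int.toStr row ++ ":" ++ c ++ PySem.Int.toStr (row + nb - 1)) :: genRows c rest (row + nb + 1)

theorem foldl_append_map {α β : Type} (f : α → β) :
    ∀ (l : List α) (ps : List β), l.foldl (fun r x => r ++ [f x]) ps = ps ++ l.map f
  | [], ps => by simp
  | x :: l, ps => by
    simp [List.foldl, foldl_append_map f l]

theorem B_loop (c : String) :
    ∀ (xs : List Int) (ps : List String) (row : Int),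
      xs.foldl (fun (acc : List String × Int) nb =>
        (acc.1 ++ [c ++ PySem.Int.toStr acc.2 ++ ":" ++ c ++ PySem.Int.toStr (acc.2 + nb - 1)],
         acc.2 + nb + 1)) (ps, row)
      = (ps ++ genRows c xs row, row + xs.sum + (xs.length : Int))
  | [], ps, row => by simp [genRows]
  | nb :: rest, ps, row => by
    rw [List.foldl_cons, B_loop c rest]
    refine Prod.ext ?_ ?_
    · simp [genRows]
    · simp only [List.sum_cons, List.length_cons]; push_cast; ring

theorem A_map (c : String) (base : Int) (full : List Int) :
    ∀ (rest : List Int) (k : Nat), full.drop k = rest →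
      (PySem.List.enumerate rest (k : Int)).map
        (fun p : Int × Int =>
          c ++ PySem.Int.toStr (base + (PySem.List.slice full none (some p.1)).sum + p.1) ++ ":" ++
          c ++ PySem.Int.toStr (base + (PySem.List.slice full none (some p.1)).sum + p.1 +
            p.2 - 1))
      = genRows c rest (base + (full.take k).sum + (k : Int))
  | [], k, _ => by simp [genRows, PySem.List.enumerate]
  | nb :: rest, k, hk => by
    have hlt : k < full.length := by
      by_contra h
      simp [List.drop_eq_nil_of_le (Nat.le_of_not_lt h)] at hk
    have hget : full[k]'hlt = nb := by
      have h0 : (full.drop k)[0]'(by simp [hk]) = nb := by simp [hk]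
      simpa using h0
    have htake : full.take (k + 1) = full.take k ++ [nb] := by
      rw [List.take_succ]
      simp [List.getElem?_eq_getElem hlt, hget]
    have hdrop : full.drop (k + 1) = rest := by
      rw [← List.tail_drop, hk]; rfl
    have hcast : ((k : Int) + 1) = (((k + 1 : Nat) : Int)) := by push_cast; ring
    rw [PySem.List.enumerate_cons, List.map_cons, hcast, A_map c base full rest (k + 1) hdrop,
      genRows]
    have hslice : PySem.List.slice full none (some ((k : Nat) : Int)) = full.take k :=
      PySem.List.slice_to_natCast full k
    congr 2
    · rw [hslice]
    · rw [hslice]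
    · rw [htake]
      simp only [List.sum_append, List.sum_cons, List.sum_nil]
      push_cast
      ring

-- ===== VERDICT (by name: the statement is the Claim_ definition above) =====
theorem all_indicators_range_spec : Claim_equal_all_indicators_range := by
  intro c xs row pen _
  unfold Spec_all_indicators_range all_indicators_range all_indicators_range_alt
  rw [foldl_append_map, B_loop c xs [] (row + 1)]
  have hA := A_map c (row + 1) xs xs 0 rfl
  simp only [Nat.cast_zero, List.take_zero, List.sum_nil, add_zero] at hA
  rw [hA]
  simp only [List.nil_append]
  congr 1
  split_ifs with h
  · congr 3
    ring
  · rfl
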